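-- pv_equiv track=rewrite | github.com/Matchoc/clashAI | clashAI.py | asPILFormat
-- ===== SOURCE A (Python) =====
-- def parseUint(val):
-- 	if val < 0:
-- 		return val + 2**8
-- 	else:
-- 		return val
--
-- def asPILFormat(asTuple, hasAlpha):
-- 	if hasAlpha:
-- 		returnList = [
-- 			tuple(
-- 				[
-- 					parseUint(asTuple[(x*4)+2]),
-- 					parseUint(asTuple[(x*4)+1]),
-- 					parseUint(asTuple[(x*4)]),
-- 					255
-- 				]
-- 			) for x in range(int(len(asTuple) / 4))]
-- 	else:
-- 		returnList = [
-- 			tuple(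
-- 				[
-- 					parseUint(asTuple[(x*4)+2]),
-- 					parseUint(asTuple[(x*4)+1]),
-- 					parseUint(asTuple[(x*4)])
-- 				]
-- 			) for x in range(int(len(asTuple) / 4))]
-- 	return returnList
-- ===== SOURCE B (Python) =====
-- def parseUint(val):
-- 	if val < 0:
-- 		return val + 2**8
-- 	else:
-- 		return val
--
-- def asPILFormat(asTuple, hasAlpha):
-- 	tail = (255,) if hasAlpha else ()
-- 	it = iter(asTuple)
-- 	return [(parseUint(r), parseUint(g), parseUint(b)) + tail
-- 	        for b, g, r, _ in zip(it, it, it, it)]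
-- ===== Notes on version B (the rewrite author's own statement) =====
-- stated objective: idiomatic
-- what changed: Replaced the two index-arithmetic range comprehensions with a single pass that groups the sequence into 4-byte chunks via zip over one shared iterator and appends a precomputed alpha tail.
import Mathlib
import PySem

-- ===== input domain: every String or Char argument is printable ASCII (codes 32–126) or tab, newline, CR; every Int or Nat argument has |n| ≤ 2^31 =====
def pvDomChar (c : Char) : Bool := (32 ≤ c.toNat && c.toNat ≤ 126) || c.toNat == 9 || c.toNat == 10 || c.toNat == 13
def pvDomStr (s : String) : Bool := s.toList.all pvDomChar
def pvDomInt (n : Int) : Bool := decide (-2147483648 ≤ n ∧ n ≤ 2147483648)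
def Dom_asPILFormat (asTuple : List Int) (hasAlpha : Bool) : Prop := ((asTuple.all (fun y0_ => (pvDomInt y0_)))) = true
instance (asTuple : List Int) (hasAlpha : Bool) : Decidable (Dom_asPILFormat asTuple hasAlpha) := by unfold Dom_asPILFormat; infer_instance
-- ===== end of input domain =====

-- B re-groups the input into 4-byte chunks in one pass (zip over a shared iterator) instead of
-- two index-arithmetic range comprehensions; same O(n) cost, more idiomatic.
-- ===== PORT A =====
def parseUintA (val : Int) : Int :=
  if val < 0 then val + 2 ^ 8 else val

def asPILFormat (asTuple : List Int) (hasAlpha : Bool) : List (List Int) :=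
  if hasAlpha then
    (PySem.List.pyRange 0 ((asTuple.length / 4 : Nat) : Int) 1).map (fun x =>
      [parseUintA (PySem.List.pyGetD asTuple (x * 4 + 2) 0),
       parseUintA (PySem.List.pyGetD asTuple (x * 4 + 1) 0),
       parseUintA (PySem.List.pyGetD asTuple (x * 4) 0),
       255])
  else
    (PySem.List.pyRange 0 ((asTuple.length / 4 : Nat) : Int) 1).map (fun x =>
      [parseUintA (PySem.List.pyGetD asTuple (x * 4 + 2) 0),
       parseUintA (PySem.List.pyGetD asTuple (x * 4 + 1) 0),
       parseUintA (PySem.List.pyGetD asTuple (x * 4) 0)])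

-- ===== PORT B =====
def parseUintB (val : Int) : Int :=
  if val < 0 then val + 2 ^ 8 else val

-- the 'for b, g, r, _ in zip(it, it, it, it)' loop: consume 4 elements per pixel, stop when < 4 remain
def pxChunks (tail : List Int) : List Int → List (List Int)
  | b :: g :: r :: _ :: rest =>
      ([parseUintB r, parseUintB g, parseUintB b] ++ tail) :: pxChunks tail rest
  | _ => []

def asPILFormat_alt (asTuple : List Int) (hasAlpha : Bool) : List (List Int) :=
  pxChunks (if hasAlpha then [255] else []) asTuple

-- ===== PRECONDITION & SPEC =====
def Spec_asPILFormat (asTuple : List Int) (hasAlpha : Bool) (out : List (List Int)) : Prop := out = asPILFormat_alt asTuple hasAlpha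
instance (asTuple : List Int) (hasAlpha : Bool) (out : List (List Int)) : Decidable (Spec_asPILFormat asTuple hasAlpha out) := by unfold Spec_asPILFormat; infer_instance

-- ===== CLAIM (what is proved, stated in full; the proofs are below) =====
def Claim_equal_asPILFormat : Prop := ∀ (asTuple : List Int) (hasAlpha : Bool), Dom_asPILFormat asTuple hasAlpha → Spec_asPILFormat asTuple hasAlpha (asPILFormat asTuple hasAlpha)

-- ===== LEMMAS AND PROOFS =====

-- A's comprehension, with pyRange/pyGetD rewritten to List.range / List.getD on Nat indices
theorem A_range_form (xs : List Int) (tail : List Int) :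
    (PySem.List.pyRange 0 ((xs.length / 4 : Nat) : Int) 1).map (fun x =>
      [parseUintA (PySem.List.pyGetD xs (x * 4 + 2) 0),
       parseUintA (PySem.List.pyGetD xs (x * 4 + 1) 0),
       parseUintA (PySem.List.pyGetD xs (x * 4) 0)] ++ tail)
    = (List.range (xs.length / 4)).map (fun k =>
      [parseUintA (xs.getD (k * 4 + 2) 0),
       parseUintA (xs.getD (k * 4 + 1) 0),
       parseUintA (xs.getD (k * 4) 0)] ++ tail) := by
  rw [PySem.List.pyRange_zero_natCast, List.map_map]
  refine List.map_congr_left (fun k _ => ?_)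
  have h2 : ((k : Int) * 4 + 2) = ((k * 4 + 2 : Nat) : Int) := by push_cast; ring
  have h1 : ((k : Int) * 4 + 1) = ((k * 4 + 1 : Nat) : Int) := by push_cast; ring
  have h0 : ((k : Int) * 4) = ((k * 4 : Nat) : Int) := by push_cast; ring
  simp only [Function.comp_apply]
  rw [h2, h1, h0, PySem.List.pyGetD_natCast, PySem.List.pyGetD_natCast,
      PySem.List.pyGetD_natCast]

-- the range/getD form of A equals B's chunk recursion (induction four elements at a time)
theorem core (tail : List Int) : (xs : List Int) →
    (List.range (xs.length / 4)).map (fun k =>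
      [parseUintA (xs.getD (k * 4 + 2) 0),
       parseUintA (xs.getD (k * 4 + 1) 0),
       parseUintA (xs.getD (k * 4) 0)] ++ tail)
    = pxChunks tail xs
  | [] => by simp [pxChunks]
  | [_] => by simp [pxChunks]
  | [_, _] => by simp [pxChunks]
  | [_, _, _] => by simp [pxChunks]
  | b :: g :: r :: a :: rest => by
    have hlen : (b :: g :: r :: a :: rest).length / 4 = rest.length / 4 + 1 := by
      simp only [List.length_cons]; omega
    rw [hlen, List.range_succ_eq_map, List.map_cons, List.map_map]
    show _ :: _ = _ :: _
    refine congrArg₂ List.cons rfl ?_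
    rw [← core tail rest]
    refine List.map_congr_left (fun k _ => ?_)
    have e0 : (k + 1) * 4 = (k * 4) + 1 + 1 + 1 + 1 := by omega
    simp only [Function.comp_apply, Nat.succ_eq_add_one, e0, List.getD_cons_succ]

-- ===== VERDICT (by name: the statement is the Claim_ definition above) =====
theorem asPILFormat_spec : Claim_equal_asPILFormat := by
  intro asTuple hasAlpha _
  unfold Spec_asPILFormat asPILFormat asPILFormat_alt
  cases hasAlpha
  · have hf : ¬((false : Bool) = true) := by simp
    rw [if_neg hf, if_neg hf]
    have h := (A_range_form asTuple []).trans (core [] asTuple)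
    simpa using h
  · rw [if_pos rfl, if_pos rfl]
    have h := (A_range_form asTuple [255]).trans (core [255] asTuple)
    simpa using h
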